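-- pv_equiv track=rewrite | github.com/Maximus169/bstu-compilers | lab3/lab3.py | parseRoman
-- ===== SOURCE A (Python) =====
-- def parseRoman(object):
--     result = 0
--     for i in range(len(object)):
--         if object[i] == 'I':
--             result += 1
--         elif object[i] == 'V':
--             result += 5
--         elif object[i] == 'X':
--             result += 10
--     return result
-- ===== SOURCE B (Python) =====
-- VAL = {'I': 1, 'V': 5, 'X': 10}
--
-- def parseRoman(object):
--     # Divide and conquer: the weighted sum is additive over concatenation,
--     # so split in half, recurse, and add; base cases via a value table.
--     if len(object) == 0:
--         return 0
--     if len(object) == 1: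
--         return VAL.get(object, 0)
--     m = len(object) // 2
--     return parseRoman(object[:m]) + parseRoman(object[m:])
-- ===== Notes on version B (the rewrite author's own statement) =====
-- stated objective: alternative
-- what changed: Replaced A's left-to-right indexed if/elif accumulation loop by a divide-and-conquer recursion that halves the string, recurses on both halves and adds, resolving single characters through a value table; correct because the weighted sum is additive over concatenation.
import Mathlib
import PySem

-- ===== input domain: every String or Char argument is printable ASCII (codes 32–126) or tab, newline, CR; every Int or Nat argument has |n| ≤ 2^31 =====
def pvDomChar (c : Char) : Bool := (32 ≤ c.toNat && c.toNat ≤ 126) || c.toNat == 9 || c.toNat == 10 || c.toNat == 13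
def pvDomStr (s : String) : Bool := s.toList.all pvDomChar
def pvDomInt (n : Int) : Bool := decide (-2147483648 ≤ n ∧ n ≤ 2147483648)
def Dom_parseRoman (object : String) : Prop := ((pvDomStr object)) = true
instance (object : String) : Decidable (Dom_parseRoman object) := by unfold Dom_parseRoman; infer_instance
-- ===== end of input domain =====

-- B replaces A's left-to-right indexed if/elif loop by divide-and-conquer: split in half, recurse, add, with a value-table lookup at the base case (alternative decomposition, same return value).


-- ===== PORT A =====
-- for i in range(len(object)): if/elif on object[i], accumulating result
def parseRoman (object : String) : Int :=
  object.toList.foldl (fun result c =>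
    if c = 'I' then result + 1
    else if c = 'V' then result + 5
    else if c = 'X' then result + 10
    else result) 0

-- ===== PORT B =====
-- VAL = {'I': 1, 'V': 5, 'X': 10}
def pvVAL : PySem.Dict Char Int := PySem.Dict.ofList [('I', 1), ('V', 5), ('X', 10)]

-- divide and conquer on the character list; VAL.get(object, 0) on the single-character base case
def pvGo : List Char → Int
  | [] => 0
  | [c] => pvVAL.getD c 0
  | a :: b :: rest =>
      let l := a :: b :: rest
      let m := l.length / 2
      pvGo (l.take m) + pvGo (l.drop m)
termination_by l => l.length
decreasing_by
  · simp [List.length_take]; omega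
  · simp [List.length_drop]; omega

def parseRoman_alt (object : String) : Int := pvGo object.toList

-- ===== PRECONDITION & SPEC =====
def Spec_parseRoman (object : String) (out : Int) : Prop := out = parseRoman_alt object
instance (object : String) (out : Int) : Decidable (Spec_parseRoman object out) := by unfold Spec_parseRoman; infer_instance

-- ===== CLAIM (what is proved, stated in full; the proofs are below) =====
def Claim_equal_parseRoman : Prop := ∀ (object : String), Dom_parseRoman object → Spec_parseRoman object (parseRoman object)

-- ===== LEMMAS AND PROOFS =====
-- the per-character weight both programs realise
def pvW (c : Char) : Int :=
  if c = 'I' then 1 else if c = 'V' then 5 else if c = 'X' then 10 else 0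

theorem pvGo_eq_sum (l : List Char) : pvGo l = (l.map pvW).sum := by
  induction l using pvGo.induct with
  | case1 => simp [pvGo]
  | case2 c =>
    have hv : pvVAL = PySem.Dict.mk [('I', 1), ('V', 5), ('X', 10)] := by decide
    simp only [pvGo, List.map, List.sum_cons, List.sum_nil, add_zero, pvW, hv,
      PySem.Dict.getD, PySem.Dict.get?_mk_cons]
    by_cases h1 : c = 'I' <;> by_cases h2 : c = 'V' <;> by_cases h3 : c = 'X' <;>
      simp_all [PySem.Dict.get?] <;>
      first
      | rfl
      | (rw [if_neg (fun hh => h1 hh.symm), if_neg (fun hh => h2 hh.symm),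
             if_neg (fun hh => h3 hh.symm)]; rfl)
  | case3 a b rest l m ih1 ih2 =>
    rw [pvGo]
    exact ih1 ▸ ih2 ▸ (by rw [← List.sum_append, ← List.map_append, List.take_append_drop])

theorem foldl_eq_sum (l : List Char) (acc : Int) :
    l.foldl (fun result c =>
      if c = 'I' then result + 1
      else if c = 'V' then result + 5
      else if c = 'X' then result + 10
      else result) acc = acc + (l.map pvW).sum := by
  induction l generalizing acc with
  | nil => simp
  | cons c t ih =>
    simp only [List.foldl_cons, ih, List.map, List.sum_cons, pvW]
    by_cases h1 : c = 'I' <;> by_cases h2 : c = 'V' <;> by_cases h3 : c = 'X' <;>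
      simp_all <;> ring

-- ===== VERDICT (by name: the statement is the Claim_ definition above) =====
theorem parseRoman_spec : Claim_equal_parseRoman := by
  intro object _
  unfold Spec_parseRoman parseRoman parseRoman_alt
  rw [foldl_eq_sum, pvGo_eq_sum, zero_add]
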